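-- pv_equiv track=rewrite | github.com/ericmerle3789/Collatz-Junction-Theorem | research_log/R171_MITM_allS.py | dp_forward_sums
-- ===== SOURCE A (Python) =====
-- def dp_forward_sums(coeff_list, d, top, min_start=0):
--     """
--     DP pour calculer toutes les sommes mod d possibles
--     pour des compositions monotones.
--     """
--     n_terms = len(coeff_list)
--     if n_terms == 0:
--         return {0}
--
--     pow2 = [pow(2, b, d) for b in range(top + 1)]
--
--     exact_at_b = {}
--     for b in range(min_start, top + 1):
--         val = (coeff_list[0] * pow2[b]) % d
--         if b not in exact_at_b:
--             exact_at_b[b] = set()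
--         exact_at_b[b].add(val)
--
--     for j in range(1, n_terms):
--         cumul = set()
--         new_exact_at_b = {}
--
--         for b in range(min_start, top + 1):
--             if b in exact_at_b:
--                 cumul |= exact_at_b[b]
--
--             if cumul:
--                 addition = (coeff_list[j] * pow2[b]) % d
--                 new_set = set()
--                 for s in cumul:
--                     new_set.add((s + addition) % d)
--                 new_exact_at_b[b] = new_set
--
--         exact_at_b = new_exact_at_b
--
--     result = set()
--     for s_set in exact_at_b.values():
--         result |= s_set
--     return result
-- ===== SOURCE B (Python) =====
-- def dp_forward_sums(coeff_list, d, top, min_start=0):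
--     """
--     Transposed DP: one streaming pass over the exponent b (outer), with one
--     ordered prefix list per coefficient level (inner), instead of one pass per
--     coefficient over all exponents; the per-layer dict and final union pass
--     disappear and the answer is the last level's prefix list.
--     """
--     if not coeff_list:
--         return {0}
--     n = len(coeff_list)
--     pref = [[] for _ in range(n)]
--     seen = [set() for _ in range(n)]
--     for b in range(min_start, top + 1):
--         p = pow(2, b, d)
--         vals = [(coeff_list[0] * p) % d]
--         for j in range(n):
--             if j > 0:
--                 a = (coeff_list[j] * p) % d
--                 vals = [(s + a) % d for s in pref[j - 1]]
--             pj, sj = pref[j], seen[j]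
--             for v in vals:
--                 if v not in sj:
--                     sj.add(v)
--                     pj.append(v)
--     return set(pref[-1])
-- ===== Notes on version B (the rewrite author's own statement) =====
-- stated objective: alternative
-- what changed: Transposes the DP loop nest: a single streaming pass over exponents b (outer) maintaining one ordered prefix list per coefficient level (inner) and returning the last level's list, instead of A's one pass per coefficient that rebuilds a dict of per-exponent sets with a running cumulative union and a final union pass.
-- outside the precondition, e.g. on dp_forward_sums([1], 5, 1, -1): A returns {1, 2}, B returns {1, 2, 3}; on dp_forward_sums([1], 4, 1, -1): A returns {1, 2}, B raises ValueError
import Mathlib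
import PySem

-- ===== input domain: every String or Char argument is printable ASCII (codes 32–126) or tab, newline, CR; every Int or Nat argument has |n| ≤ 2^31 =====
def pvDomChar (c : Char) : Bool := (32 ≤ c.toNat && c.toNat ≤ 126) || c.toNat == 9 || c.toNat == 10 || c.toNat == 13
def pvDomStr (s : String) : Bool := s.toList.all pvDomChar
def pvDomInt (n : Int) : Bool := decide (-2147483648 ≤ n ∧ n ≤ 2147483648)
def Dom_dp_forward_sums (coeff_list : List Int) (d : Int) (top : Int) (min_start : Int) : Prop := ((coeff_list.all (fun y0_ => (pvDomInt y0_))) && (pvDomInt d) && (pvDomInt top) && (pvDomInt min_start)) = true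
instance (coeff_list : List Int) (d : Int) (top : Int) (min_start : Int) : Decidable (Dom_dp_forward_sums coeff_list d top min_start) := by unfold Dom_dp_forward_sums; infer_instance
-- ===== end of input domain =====

-- B transposes the DP loop nest: one streaming pass over exponents with one ordered prefix
-- list per coefficient level, instead of A's one pass per coefficient rebuilding a dict of
-- per-exponent sets with a running cumulative union and a final union pass (objective: alternative).

-- ===== PORT A =====
def dp_forward_sums (coeff_list : List Int) (d : Int) (top : Int) (min_start : Int) : List Int :=
  let n_terms : Int := (coeff_list.length : Int)
  if n_terms == 0 then [0]
  else
    let pow2 : List Int := (PySem.List.pyRange 0 (top + 1) 1).map (fun b => PySem.Int.powMod 2 b.toNat d)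
    let exact0 : PySem.Dict Int (PySem.Set Int) :=
      (PySem.List.pyRange min_start (top + 1) 1).foldl (fun ex b =>
        let val := PySem.Int.mod (PySem.List.pyGetD coeff_list 0 0 * PySem.List.pyGetD pow2 b 0) d
        let ex := if ex.contains b then ex else ex.insert b PySem.Set.empty
        ex.modify b PySem.Set.empty (fun s => PySem.Set.add s val)) PySem.Dict.empty
    let exactN : PySem.Dict Int (PySem.Set Int) :=
      (PySem.List.pyRange 1 n_terms 1).foldl (fun ex j =>
        ((PySem.List.pyRange min_start (top + 1) 1).foldl
          (fun (st : PySem.Set Int × PySem.Dict Int (PySem.Set Int)) b =>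
            let cumul := if ex.contains b then PySem.Set.union st.1 (ex.getD b PySem.Set.empty) else st.1
            if cumul.isEmpty then (cumul, st.2)
            else
              let addition := PySem.Int.mod (PySem.List.pyGetD coeff_list j 0 * PySem.List.pyGetD pow2 b 0) d
              let new_set := cumul.foldl (fun ns s => PySem.Set.add ns (PySem.Int.mod (s + addition) d)) PySem.Set.empty
              (cumul, st.2.insert b new_set))
          (PySem.Set.empty, PySem.Dict.empty)).2) exact0
    exactN.values.foldl (fun r s => PySem.Set.union r s) PySem.Set.empty

-- ===== PORT B =====
def dp_forward_sums_alt (coeff_list : List Int) (d : Int) (top : Int) (min_start : Int) : List Int :=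
  if coeff_list.isEmpty then [0]
  else
    let n : Int := (coeff_list.length : Int)
    let pref0 : List (PySem.Set Int) := List.replicate coeff_list.length PySem.Set.empty
    let prefN := (PySem.List.pyRange min_start (top + 1) 1).foldl (fun pref b =>
      let p := PySem.Int.powMod 2 b.toNat d
      let vals0 : List Int := [PySem.Int.mod (PySem.List.pyGetD coeff_list 0 0 * p) d]
      ((PySem.List.pyRange 0 n 1).foldl (fun (st : List (PySem.Set Int) × List Int) j =>
          let vals := if j == 0 then st.2
            else (PySem.List.pyGetD st.1 (j - 1) PySem.Set.empty).map
              (fun s => PySem.Int.mod (s + PySem.Int.mod (PySem.List.pyGetD coeff_list j 0 * p) d) d)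
          let pj := PySem.List.pyGetD st.1 j PySem.Set.empty
          (PySem.List.pySetD st.1 j (PySem.Set.update pj vals), vals))
        (pref, vals0)).1) pref0
    PySem.Set.ofList (PySem.List.pyGetD prefN (-1) PySem.Set.empty)

-- ===== PRECONDITION & SPEC =====
-- Pre_ excludes inputs where Python A raises — d = 0 with a nonempty pow-table range
-- (ValueError from three-argument pow), unless A returns before building it — and negative
-- min_start with a nonempty exponent range, where A's value is an artefact of negative-index
-- wraparound into its pow2 table (or IndexError) while B's direct pow(2, b, d) raises
-- ValueError for non-invertible moduli or returns inverse-based sums.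
def Pre_dp_forward_sums (coeff_list : List Int) (d : Int) (top : Int) (min_start : Int) : Prop :=
  (d ≠ 0 ∨ coeff_list = [] ∨ top < 0) ∧ (0 ≤ min_start ∨ top < min_start)
instance (coeff_list : List Int) (d : Int) (top : Int) (min_start : Int) : Decidable (Pre_dp_forward_sums coeff_list d top min_start) := by unfold Pre_dp_forward_sums; infer_instance

def pvWitness_dp_forward_sums : List Int × Int × Int × Int := ([3, 5], 7, 4, 0)

def Spec_dp_forward_sums (coeff_list : List Int) (d : Int) (top : Int) (min_start : Int) (out : List Int) : Prop := out = dp_forward_sums_alt coeff_list d top min_start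
instance (coeff_list : List Int) (d : Int) (top : Int) (min_start : Int) (out : List Int) : Decidable (Spec_dp_forward_sums coeff_list d top min_start out) := by unfold Spec_dp_forward_sums; infer_instance

-- ===== CLAIM (what is proved, stated in full; the proofs are below) =====
def Claim_equal_dp_forward_sums : Prop := ∀ (coeff_list : List Int) (d : Int) (top : Int) (min_start : Int), Dom_dp_forward_sums coeff_list d top min_start → Pre_dp_forward_sums coeff_list d top min_start → Spec_dp_forward_sums coeff_list d top min_start (dp_forward_sums coeff_list d top min_start)

-- ===== LEMMAS AND PROOFS =====

-- The common value both ports are proved equal to: the residue lists by level.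
-- pvR0 c0 d b : the (singleton) list of first-level values at exponent b;
-- pvStep d ms c R b : one more coefficient c, exponents up to b; pvIter folds pvStep.
def pvR0 (c0 d : Int) : Int → List Int := fun b => [PySem.Int.mod (c0 * PySem.Int.powMod 2 b.toNat d) d]

def pvStep (d ms c : Int) (R : Int → List Int) : Int → List Int :=
  fun b => ((PySem.List.pyRange ms (b + 1) 1).flatMap R).map
    (fun s => PySem.Int.mod (s + PySem.Int.mod (c * PySem.Int.powMod 2 b.toNat d) d) d)

def pvIter (d ms : Int) (cs : List Int) (R : Int → List Int) : Int → List Int :=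
  cs.foldl (fun R c => pvStep d ms c R) R

-- ---- generic PySem.Set lemmas ----
theorem sUpdate_ofList_arg {α : Type} [BEq α] [LawfulBEq α] (s : PySem.Set α) (ys : List α) :
    PySem.Set.update s (PySem.Set.ofList ys) = PySem.Set.update s ys := by
  rw [PySem.Set.update_eq_append_filter, PySem.Set.update_eq_append_filter, PySem.Set.ofList_ofList]

theorem sUnion_ofList {α : Type} [BEq α] [LawfulBEq α] (xs ys : List α) :
    PySem.Set.union (PySem.Set.ofList xs) (PySem.Set.ofList ys) = PySem.Set.ofList (xs ++ ys) := by
  show PySem.Set.update (PySem.Set.ofList xs) (PySem.Set.ofList ys) = _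
  rw [sUpdate_ofList_arg, PySem.Set.ofList_append]

theorem sOfList_map_ofList {α β : Type} [BEq α] [LawfulBEq α] [BEq β] [LawfulBEq β]
    (xs : List α) (f : α → β) :
    PySem.Set.ofList ((PySem.Set.ofList xs).map f) = PySem.Set.ofList (xs.map f) := by
  induction xs using List.reverseRecOn with
  | nil => rfl
  | append_singleton xs x ih =>
    rw [PySem.Set.ofList_append_singleton, PySem.Set.add_eq_ite]
    by_cases hx : x ∈ PySem.Set.ofList xs
    · have hx' : x ∈ xs := (PySem.Set.mem_ofList ..).mp hx
      rw [if_pos hx, ih, List.map_append, List.map_singleton,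
        PySem.Set.ofList_append_singleton, PySem.Set.add_of_mem]
      rw [PySem.Set.mem_ofList]
      exact List.mem_map_of_mem hx'
    · rw [if_neg hx, List.map_append, List.map_singleton, PySem.Set.ofList_append_singleton,
        List.map_append, List.map_singleton, PySem.Set.ofList_append_singleton, ih]

theorem sUpdate_map_ofList {α β : Type} [BEq α] [LawfulBEq α] [BEq β] [LawfulBEq β]
    (s : PySem.Set β) (xs : List α) (f : α → β) :
    PySem.Set.update s ((PySem.Set.ofList xs).map f) = PySem.Set.update s (xs.map f) := by
  rw [PySem.Set.update_eq_append_filter, PySem.Set.update_eq_append_filter, sOfList_map_ofList]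

theorem sFoldUnion (ps : List (List Int)) : ∀ (acc : List Int),
    (ps.map (fun xs => (PySem.Set.ofList xs : PySem.Set Int))).foldl
      (fun r s => PySem.Set.union r s) (PySem.Set.ofList acc)
    = PySem.Set.ofList (acc ++ ps.flatten) := by
  induction ps with
  | nil => intro acc; simp
  | cons p ps ih =>
    intro acc
    rw [List.map_cons, List.foldl_cons, sUnion_ofList, ih, List.flatten_cons, List.append_assoc]

theorem sOfList_ne_nil {α : Type} [BEq α] [LawfulBEq α] (xs : List α) (h : xs ≠ []) :
    PySem.Set.ofList xs ≠ [] := by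
  obtain ⟨x, hx⟩ := List.exists_mem_of_ne_nil xs h
  exact List.ne_nil_of_mem ((PySem.Set.mem_ofList ..).mpr hx)

theorem union_ne_nil (a v : PySem.Set Int) (hv : v ≠ []) : PySem.Set.union a v ≠ [] := by
  obtain ⟨x, hx⟩ := List.exists_mem_of_ne_nil v hv
  have : x ∈ PySem.Set.union a v := (PySem.Set.mem_union a v x).mpr (Or.inr hx)
  exact List.ne_nil_of_mem this

theorem shift_foldl (cu : PySem.Set Int) (h : Int → Int) :
    cu.foldl (fun ns s => PySem.Set.add ns (h s)) PySem.Set.empty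
      = PySem.Set.ofList (cu.map (fun s => h s)) := by
  rw [PySem.Set.ofList_eq_foldl, List.foldl_map]
  rfl

-- ---- dict plumbing (A side) ----
theorem foldl_over_keys {β : Type} (ex : PySem.Dict Int (PySem.Set Int)) (hk : ex.keys.Nodup)
    (F : β → Int → PySem.Set Int → β) :
    ∀ (L : List (Int × PySem.Set Int)), (∀ p ∈ L, p ∈ ex.items) → ∀ (init : β),
    (L.map Prod.fst).foldl (fun st b => F st b (ex.getD b PySem.Set.empty)) init
      = L.foldl (fun st p => F st p.1 p.2) init := by
  intro L
  induction L with
  | nil => intro _ init; rfl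
  | cons p L ih =>
    intro h init
    obtain ⟨k, v⟩ := p
    have hget : ex.getD k PySem.Set.empty = v :=
      PySem.Dict.getD_of_mem_items ex (h (k, v) (List.mem_cons_self ..)) hk _
    simp only [List.map_cons, List.foldl_cons, hget]
    exact ih (fun p hp => h p (List.mem_cons_of_mem _ hp)) _

theorem contains_mk_append (E : List (Int × PySem.Set Int)) (q : Int × PySem.Set Int) (k : Int) :
    (PySem.Dict.mk (E ++ [q]) : PySem.Dict Int (PySem.Set Int)).contains k
      = ((PySem.Dict.mk E : PySem.Dict Int (PySem.Set Int)).contains k || (q.1 == k)) := by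
  simp [PySem.Dict.contains]

theorem map_keep_of_not_contains (E : List (Int × PySem.Set Int))
    (b : Int) (x : Int × PySem.Set Int)
    (h : (PySem.Dict.mk E : PySem.Dict Int (PySem.Set Int)).contains b = false) :
    E.map (fun p => if p.1 == b then x else p) = E := by
  simp only [PySem.Dict.contains, List.any_eq_false] at h
  have : ∀ p ∈ E, (fun p => if p.1 == b then x else p) p = id p := by
    intro p hp
    simp [h p hp]
  rw [List.map_congr_left this, List.map_id]

theorem dict_eta (dd : PySem.Dict Int (PySem.Set Int)) : dd = PySem.Dict.mk dd.items := by
  cases dd; rfl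

theorem foldA0 (val : Int → Int) (bs : List Int) :
    bs.Nodup → ∀ (D : PySem.Dict Int (PySem.Set Int)), (∀ b ∈ bs, D.contains b = false) →
    (bs.foldl (fun ex b =>
        PySem.Dict.modify (if ex.contains b then ex else ex.insert b PySem.Set.empty) b
          PySem.Set.empty (fun s => PySem.Set.add s (val b))) D).items
      = D.items ++ bs.map (fun b => (b, [val b])) := by
  induction bs with
  | nil => intro _ D _; simp
  | cons b bs ih =>
    intro hnd D hD
    have hDb : D.contains b = false := hD b (List.mem_cons_self ..)
    have hstep : PySem.Dict.modify (if D.contains b then D else D.insert b PySem.Set.empty) b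
          PySem.Set.empty (fun s => PySem.Set.add s (val b))
        = PySem.Dict.mk (D.items ++ [(b, [val b])]) := by
      rw [hDb]
      simp only [Bool.false_eq_true, if_false, PySem.Dict.modify, PySem.Dict.getD_insert_self]
      have hadd : PySem.Set.add PySem.Set.empty (val b) = [val b] := rfl
      rw [hadd]
      have h1 : (D.insert b PySem.Set.empty).items = D.items ++ [(b, PySem.Set.empty)] :=
        PySem.Dict.items_insert_of_not_contains D _ hDb
      have hc : (D.insert b PySem.Set.empty).contains b = true := PySem.Dict.contains_insert_self ..
      have h2 : ((D.insert b PySem.Set.empty).insert b [val b]).items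
          = ((D.insert b PySem.Set.empty).items).map (fun p => if p.1 == b then (b, [val b]) else p) :=
        PySem.Dict.items_insert_of_contains _ _ hc
      cases hI : (D.insert b PySem.Set.empty).insert b [val b]
      case mk items =>
        have : items = D.items ++ [(b, [val b])] := by
          have := h2
          rw [hI] at this
          simp only [show ({ items := items } : PySem.Dict Int (PySem.Set Int)).items = items from rfl] at this
          rw [this, h1, List.map_append, map_keep_of_not_contains D.items b _ (by
            cases D; exact hDb)]
          simp
        rw [this]
    rw [List.foldl_cons, hstep, ih (List.Nodup.of_cons hnd) _ (by
      intro b' hb'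
      rw [contains_mk_append]
      have h1 : (PySem.Dict.mk D.items : PySem.Dict Int (PySem.Set Int)).contains b' = false := by
        cases D; exact hD b' (List.mem_cons_of_mem _ hb')
      have hne : b ≠ b' := by
        intro h; subst h; exact (List.nodup_cons.mp hnd).1 hb'
      simp [h1, hne])]
    simp

-- ---- A side: one pass of the j-loop ----
def stepEntries (g : Int → Int → Int) (R : Int → List Int) : List Int → List Int → List (Int × PySem.Set Int)
  | _, [] => []
  | acc, b :: bl =>
      (b, PySem.Set.ofList ((acc ++ R b).map (fun s => g b s))) :: stepEntries g R (acc ++ R b) bl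

theorem foldPass (g : Int → Int → Int) (R : Int → List Int) :
    ∀ (bl : List Int) (acc : List Int) (D : PySem.Dict Int (PySem.Set Int)),
    (∀ b ∈ bl, D.contains b = false) → bl.Nodup →
    ((bl.map (fun b => (b, (PySem.Set.ofList (R b) : PySem.Set Int)))).foldl
       (fun (st : PySem.Set Int × PySem.Dict Int (PySem.Set Int)) p =>
         (PySem.Set.union st.1 p.2,
          st.2.insert p.1 (PySem.Set.ofList ((PySem.Set.union st.1 p.2).map (fun s => g p.1 s)))))
       (PySem.Set.ofList acc, D)).2.items
    = D.items ++ stepEntries g R acc bl := by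
  intro bl
  induction bl with
  | nil => intro acc D _ _; simp [stepEntries]
  | cons b bl ih =>
    intro acc D hD hnd
    have hDb : D.contains b = false := hD b (List.mem_cons_self ..)
    simp only [List.map_cons, List.foldl_cons]
    rw [sUnion_ofList, sOfList_map_ofList]
    have hins : (D.insert b (PySem.Set.ofList ((acc ++ R b).map (fun s => g b s)))).items
        = D.items ++ [(b, PySem.Set.ofList ((acc ++ R b).map (fun s => g b s)))] :=
      PySem.Dict.items_insert_of_not_contains D _ hDb
    have hrw : D.insert b (PySem.Set.ofList ((acc ++ R b).map (fun s => g b s)))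
        = PySem.Dict.mk (D.items ++ [(b, PySem.Set.ofList ((acc ++ R b).map (fun s => g b s)))]) := by
      cases hI : D.insert b (PySem.Set.ofList ((acc ++ R b).map (fun s => g b s)))
      case mk items =>
        congr 1
        have := hins; rw [hI] at this; exact this
    rw [hrw, ih (acc ++ R b) _ (by
      intro b' hb'
      rw [contains_mk_append]
      have h1 : (PySem.Dict.mk D.items : PySem.Dict Int (PySem.Set Int)).contains b' = false := by
        cases D; exact hD b' (List.mem_cons_of_mem _ hb')
      have hne : b ≠ b' := by
        intro h; subst h; exact (List.nodup_cons.mp hnd).1 hb'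
      simp [h1, hne]) (List.Nodup.of_cons hnd)]
    simp [stepEntries]

theorem stepEntries_range (g : Int → Int → Int) (R : Int → List Int) (ms t : Int) :
    ∀ (k : Nat) (lo : Int), ms ≤ lo → (t + 1 - lo).toNat = k →
    stepEntries g R ((PySem.List.pyRange ms lo 1).flatMap R) (PySem.List.pyRange lo (t + 1) 1)
      = (PySem.List.pyRange lo (t + 1) 1).map
          (fun b => (b, PySem.Set.ofList (((PySem.List.pyRange ms (b + 1) 1).flatMap R).map (fun s => g b s)))) := by
  intro k
  induction k with
  | zero =>
    intro lo _ hk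
    have hnil : PySem.List.pyRange lo (t + 1) 1 = [] :=
      PySem.List.pyRange_one_eq_nil (by omega)
    rw [hnil]
    rfl
  | succ k ih =>
    intro lo hlo hk
    by_cases hlt : lo < t + 1
    · have hsplit : (PySem.List.pyRange ms lo 1).flatMap R ++ R lo
          = (PySem.List.pyRange ms (lo + 1) 1).flatMap R := by
        rw [PySem.List.pyRange_one_succ_right hlo, List.flatMap_append, List.flatMap_cons,
          List.flatMap_nil, List.append_nil]
      rw [PySem.List.pyRange_one_cons hlt]
      show (lo, PySem.Set.ofList (((PySem.List.pyRange ms lo 1).flatMap R ++ R lo).map (fun s => g lo s)))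
          :: stepEntries g R ((PySem.List.pyRange ms lo 1).flatMap R ++ R lo) (PySem.List.pyRange (lo + 1) (t + 1) 1) = _
      rw [hsplit, List.map_cons, ih (lo + 1) (by omega) (by omega)]
    · omega

def passA (d ms t : Int) (ex : PySem.Dict Int (PySem.Set Int)) (c : Int) : PySem.Dict Int (PySem.Set Int) :=
  ((PySem.List.pyRange ms (t + 1) 1).foldl
    (fun (st : PySem.Set Int × PySem.Dict Int (PySem.Set Int)) b =>
      let cumul := if ex.contains b then PySem.Set.union st.1 (ex.getD b PySem.Set.empty) else st.1
      if cumul.isEmpty then (cumul, st.2)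
      else
        let addition := PySem.Int.mod (c * PySem.Int.powMod 2 b.toNat d) d
        let new_set := cumul.foldl (fun ns s => PySem.Set.add ns (PySem.Int.mod (s + addition) d)) PySem.Set.empty
        (cumul, st.2.insert b new_set))
    (PySem.Set.empty, PySem.Dict.empty)).2

theorem passA_eq (d ms t : Int) (R : Int → List Int)
    (hne : ∀ b ∈ PySem.List.pyRange ms (t + 1) 1, R b ≠ []) (c : Int) :
    passA d ms t (PySem.Dict.mk ((PySem.List.pyRange ms (t + 1) 1).map
        (fun b => (b, (PySem.Set.ofList (R b) : PySem.Set Int))))) c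
      = PySem.Dict.mk ((PySem.List.pyRange ms (t + 1) 1).map
          (fun b => (b, (PySem.Set.ofList (pvStep d ms c R b) : PySem.Set Int)))) := by
  have hnd : (PySem.List.pyRange ms (t + 1) 1).Nodup := PySem.List.nodup_pyRange_one ..
  set bs := PySem.List.pyRange ms (t + 1) 1 with hbs
  set L : List (Int × PySem.Set Int) := bs.map (fun b => (b, (PySem.Set.ofList (R b) : PySem.Set Int))) with hL
  set ex : PySem.Dict Int (PySem.Set Int) := PySem.Dict.mk L with hex
  have hfst : L.map Prod.fst = bs := by simp [hL, Function.comp_def]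
  have hkeys : ex.keys = bs := by simpa [PySem.Dict.keys, hex] using hfst
  have hknd : ex.keys.Nodup := by rw [hkeys]; exact hnd
  have hget : ∀ b ∈ bs, ex.getD b PySem.Set.empty = PySem.Set.ofList (R b) := by
    intro b hb
    exact PySem.Dict.getD_of_mem_items ex
      (by rw [show ex.items = L from rfl, hL]; exact List.mem_map_of_mem hb) hknd _
  have hcongr : (bs.foldl
      (fun (st : PySem.Set Int × PySem.Dict Int (PySem.Set Int)) b =>
        let cumul := if ex.contains b then PySem.Set.union st.1 (ex.getD b PySem.Set.empty) else st.1
        if cumul.isEmpty then (cumul, st.2)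
        else
          let addition := PySem.Int.mod (c * PySem.Int.powMod 2 b.toNat d) d
          let new_set := cumul.foldl (fun ns s => PySem.Set.add ns (PySem.Int.mod (s + addition) d)) PySem.Set.empty
          (cumul, st.2.insert b new_set))
      (PySem.Set.empty, PySem.Dict.empty))
      = bs.foldl
      (fun (st : PySem.Set Int × PySem.Dict Int (PySem.Set Int)) b =>
        (PySem.Set.union st.1 (ex.getD b PySem.Set.empty),
         st.2.insert b (PySem.Set.ofList ((PySem.Set.union st.1 (ex.getD b PySem.Set.empty)).map
           (fun s => PySem.Int.mod (s + PySem.Int.mod (c * PySem.Int.powMod 2 b.toNat d) d) d)))))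
      (PySem.Set.empty, PySem.Dict.empty) := by
    apply PySem.List.foldl_congr_mem
    intro st b hb
    have hcont : ex.contains b = true := by
      rw [PySem.Dict.contains_iff_mem_keys, hkeys]; exact hb
    have hnonnil : PySem.Set.union st.1 (ex.getD b PySem.Set.empty) ≠ [] := by
      rw [hget b hb]
      exact union_ne_nil _ _ (sOfList_ne_nil _ (hne b hb))
    simp only [hcont, if_true, List.isEmpty_eq_false_iff.mpr hnonnil, Bool.false_eq_true, if_false,
      shift_foldl]
  have hover :
      bs.foldl
        (fun (st : PySem.Set Int × PySem.Dict Int (PySem.Set Int)) b =>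
          (PySem.Set.union st.1 (ex.getD b PySem.Set.empty),
           st.2.insert b (PySem.Set.ofList ((PySem.Set.union st.1 (ex.getD b PySem.Set.empty)).map
             (fun s => PySem.Int.mod (s + PySem.Int.mod (c * PySem.Int.powMod 2 b.toNat d) d) d)))))
        (PySem.Set.empty, PySem.Dict.empty)
      = L.foldl
        (fun (st : PySem.Set Int × PySem.Dict Int (PySem.Set Int)) p =>
          (PySem.Set.union st.1 p.2,
           st.2.insert p.1 (PySem.Set.ofList ((PySem.Set.union st.1 p.2).map
             (fun s => PySem.Int.mod (s + PySem.Int.mod (c * PySem.Int.powMod 2 p.1.toNat d) d) d)))))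
        (PySem.Set.empty, PySem.Dict.empty) := by
    rw [← hfst]
    exact foldl_over_keys ex hknd
      (fun (st : PySem.Set Int × PySem.Dict Int (PySem.Set Int)) (b : Int) (v : PySem.Set Int) =>
        (PySem.Set.union st.1 v,
         st.2.insert b (PySem.Set.ofList ((PySem.Set.union st.1 v).map
           (fun s => PySem.Int.mod (s + PySem.Int.mod (c * PySem.Int.powMod 2 b.toNat d) d) d)))))
      L (fun p hp => hp) _
  have hstart : ((PySem.Set.empty : PySem.Set Int), (PySem.Dict.empty : PySem.Dict Int (PySem.Set Int)))
      = ((PySem.Set.ofList [] : PySem.Set Int), (PySem.Dict.empty : PySem.Dict Int (PySem.Set Int))) := rfl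
  have hpass : passA d ms t ex c = (bs.foldl
      (fun (st : PySem.Set Int × PySem.Dict Int (PySem.Set Int)) b =>
        let cumul := if ex.contains b then PySem.Set.union st.1 (ex.getD b PySem.Set.empty) else st.1
        if cumul.isEmpty then (cumul, st.2)
        else
          let addition := PySem.Int.mod (c * PySem.Int.powMod 2 b.toNat d) d
          let new_set := cumul.foldl (fun ns s => PySem.Set.add ns (PySem.Int.mod (s + addition) d)) PySem.Set.empty
          (cumul, st.2.insert b new_set))
      (PySem.Set.empty, PySem.Dict.empty)).2 := rfl
  have hitems : (passA d ms t ex c).items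
      = stepEntries (fun b s => PySem.Int.mod (s + PySem.Int.mod (c * PySem.Int.powMod 2 b.toNat d) d) d) R [] bs := by
    rw [hpass, hcongr, hover, hstart,
      foldPass (fun b s => PySem.Int.mod (s + PySem.Int.mod (c * PySem.Int.powMod 2 b.toNat d) d) d)
        R bs [] PySem.Dict.empty (fun b _ => rfl) hnd]
    rfl
  have hflat0 : ([] : List Int) = (PySem.List.pyRange ms ms 1).flatMap R := by
    rw [PySem.List.pyRange_one_eq_nil (le_refl ms)]; rfl
  rw [dict_eta (passA d ms t ex c), hitems]
  congr 1
  rw [hflat0, stepEntries_range _ R ms t (t + 1 - ms).toNat ms (le_refl ms) rfl]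
  rfl

theorem mainLoopA (d ms t : Int) :
    ∀ (cs : List Int) (R : Int → List Int), (∀ b ∈ PySem.List.pyRange ms (t + 1) 1, R b ≠ []) →
    ((cs.foldl (passA d ms t)
        (PySem.Dict.mk ((PySem.List.pyRange ms (t + 1) 1).map
          (fun b => (b, (PySem.Set.ofList (R b) : PySem.Set Int)))))).values).foldl
      (fun r s => PySem.Set.union r s) PySem.Set.empty
    = PySem.Set.ofList ((PySem.List.pyRange ms (t + 1) 1).flatMap (pvIter d ms cs R)) := by
  intro cs
  induction cs with
  | nil =>
    intro R _
    rw [List.foldl_nil]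
    have hval : (PySem.Dict.mk ((PySem.List.pyRange ms (t + 1) 1).map
        (fun b => (b, (PySem.Set.ofList (R b) : PySem.Set Int))))).values
        = ((PySem.List.pyRange ms (t + 1) 1).map R).map (fun xs => (PySem.Set.ofList xs : PySem.Set Int)) := by
      show ((PySem.List.pyRange ms (t + 1) 1).map
        (fun b => (b, (PySem.Set.ofList (R b) : PySem.Set Int)))).map Prod.snd = _
      simp [Function.comp_def]
    rw [hval, show (PySem.Set.empty : PySem.Set Int) = PySem.Set.ofList [] from rfl,
      sFoldUnion, List.nil_append]
    show _ = PySem.Set.ofList (((PySem.List.pyRange ms (t + 1) 1).map R).flatten)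
    rfl
  | cons c cs ih =>
    intro R hne
    have hne' : ∀ b ∈ PySem.List.pyRange ms (t + 1) 1, pvStep d ms c R b ≠ [] := by
      intro b hb
      obtain ⟨h1, _⟩ := (PySem.List.mem_pyRange_one ..).mp hb
      have hbmem : b ∈ PySem.List.pyRange ms (b + 1) 1 :=
        (PySem.List.mem_pyRange_one ..).mpr ⟨h1, by omega⟩
      obtain ⟨x, hx⟩ := List.exists_mem_of_ne_nil _ (hne b hb)
      have : x ∈ (PySem.List.pyRange ms (b + 1) 1).flatMap R :=
        List.mem_flatMap.mpr ⟨b, hbmem, hx⟩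
      exact List.ne_nil_of_mem (List.mem_map_of_mem this)
    rw [List.foldl_cons, passA_eq d ms t R hne c, ih (pvStep d ms c R) hne']
    rfl

theorem aSide (c0 : Int) (rest : List Int) (d t ms : Int) (hms : 0 ≤ ms ∨ t < ms) :
    dp_forward_sums (c0 :: rest) d t ms
      = PySem.Set.ofList ((PySem.List.pyRange ms (t + 1) 1).flatMap (pvIter d ms rest (pvR0 c0 d))) := by
  have hnd : (PySem.List.pyRange ms (t + 1) 1).Nodup := PySem.List.nodup_pyRange_one ..
  have hpw : ∀ b ∈ PySem.List.pyRange ms (t + 1) 1,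
      PySem.List.pyGetD ((PySem.List.pyRange 0 (t + 1) 1).map (fun b => PySem.Int.powMod 2 b.toNat d)) b 0
        = PySem.Int.powMod 2 b.toNat d := by
    intro b hb
    obtain ⟨h1, h2⟩ := (PySem.List.mem_pyRange_one ..).mp hb
    have hb0 : 0 ≤ b := by
      rcases hms with h | h
      · omega
      · omega
    exact PySem.List.pyGetD_map_pyRange_of_nonneg _ _ _ _ hb0 h2
  show ((PySem.List.pyRange 1 ((c0 :: rest).length : Int) 1).foldl
      (fun (ex : PySem.Dict Int (PySem.Set Int)) j =>
        ((PySem.List.pyRange ms (t + 1) 1).foldl (fun (st : PySem.Set Int × PySem.Dict Int (PySem.Set Int)) b =>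
          let cumul := if ex.contains b then PySem.Set.union st.1 (ex.getD b PySem.Set.empty) else st.1
          if cumul.isEmpty then (cumul, st.2)
          else
            let addition := PySem.Int.mod (PySem.List.pyGetD (c0 :: rest) j 0 * PySem.List.pyGetD ((PySem.List.pyRange 0 (t + 1) 1).map (fun b => PySem.Int.powMod 2 b.toNat d)) b 0) d
            let new_set := cumul.foldl (fun ns s => PySem.Set.add ns (PySem.Int.mod (s + addition) d)) PySem.Set.empty
            (cumul, st.2.insert b new_set))
          (PySem.Set.empty, PySem.Dict.empty)).2)
      ((PySem.List.pyRange ms (t + 1) 1).foldl (fun (ex : PySem.Dict Int (PySem.Set Int)) b =>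
        PySem.Dict.modify (if ex.contains b then ex else ex.insert b PySem.Set.empty) b
          PySem.Set.empty (fun s => PySem.Set.add s (PySem.Int.mod (PySem.List.pyGetD (c0 :: rest) 0 0 * PySem.List.pyGetD ((PySem.List.pyRange 0 (t + 1) 1).map (fun b => PySem.Int.powMod 2 b.toNat d)) b 0) d))) PySem.Dict.empty)).values.foldl (fun r s => PySem.Set.union r s) PySem.Set.empty
    = _
  have hdrop : (PySem.List.pyRange 1 ((c0 :: rest).length : Int) 1).foldl
      (fun (ex : PySem.Dict Int (PySem.Set Int)) j =>
        ((PySem.List.pyRange ms (t + 1) 1).foldl (fun (st : PySem.Set Int × PySem.Dict Int (PySem.Set Int)) b =>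
          let cumul := if ex.contains b then PySem.Set.union st.1 (ex.getD b PySem.Set.empty) else st.1
          if cumul.isEmpty then (cumul, st.2)
          else
            let addition := PySem.Int.mod (PySem.List.pyGetD (c0 :: rest) j 0 * PySem.List.pyGetD ((PySem.List.pyRange 0 (t + 1) 1).map (fun b => PySem.Int.powMod 2 b.toNat d)) b 0) d
            let new_set := cumul.foldl (fun ns s => PySem.Set.add ns (PySem.Int.mod (s + addition) d)) PySem.Set.empty
            (cumul, st.2.insert b new_set))
          (PySem.Set.empty, PySem.Dict.empty)).2)
      ((PySem.List.pyRange ms (t + 1) 1).foldl (fun (ex : PySem.Dict Int (PySem.Set Int)) b =>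
        PySem.Dict.modify (if ex.contains b then ex else ex.insert b PySem.Set.empty) b
          PySem.Set.empty (fun s => PySem.Set.add s (PySem.Int.mod (PySem.List.pyGetD (c0 :: rest) 0 0 * PySem.List.pyGetD ((PySem.List.pyRange 0 (t + 1) 1).map (fun b => PySem.Int.powMod 2 b.toNat d)) b 0) d))) PySem.Dict.empty)
    = rest.foldl
      (fun (ex : PySem.Dict Int (PySem.Set Int)) c =>
        ((PySem.List.pyRange ms (t + 1) 1).foldl (fun (st : PySem.Set Int × PySem.Dict Int (PySem.Set Int)) b =>
          let cumul := if ex.contains b then PySem.Set.union st.1 (ex.getD b PySem.Set.empty) else st.1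
          if cumul.isEmpty then (cumul, st.2)
          else
            let addition := PySem.Int.mod (c * PySem.List.pyGetD ((PySem.List.pyRange 0 (t + 1) 1).map (fun b => PySem.Int.powMod 2 b.toNat d)) b 0) d
            let new_set := cumul.foldl (fun ns s => PySem.Set.add ns (PySem.Int.mod (s + addition) d)) PySem.Set.empty
            (cumul, st.2.insert b new_set))
          (PySem.Set.empty, PySem.Dict.empty)).2)
      ((PySem.List.pyRange ms (t + 1) 1).foldl (fun (ex : PySem.Dict Int (PySem.Set Int)) b =>
        PySem.Dict.modify (if ex.contains b then ex else ex.insert b PySem.Set.empty) b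
          PySem.Set.empty (fun s => PySem.Set.add s (PySem.Int.mod (PySem.List.pyGetD (c0 :: rest) 0 0 * PySem.List.pyGetD ((PySem.List.pyRange 0 (t + 1) 1).map (fun b => PySem.Int.powMod 2 b.toNat d)) b 0) d))) PySem.Dict.empty) :=
    PySem.List.foldl_pyRange_pyGetD' (c0 :: rest) 0
      (fun (ex : PySem.Dict Int (PySem.Set Int)) c =>
        ((PySem.List.pyRange ms (t + 1) 1).foldl (fun (st : PySem.Set Int × PySem.Dict Int (PySem.Set Int)) b =>
          let cumul := if ex.contains b then PySem.Set.union st.1 (ex.getD b PySem.Set.empty) else st.1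
          if cumul.isEmpty then (cumul, st.2)
          else
            let addition := PySem.Int.mod (c * PySem.List.pyGetD ((PySem.List.pyRange 0 (t + 1) 1).map (fun b => PySem.Int.powMod 2 b.toNat d)) b 0) d
            let new_set := cumul.foldl (fun ns s => PySem.Set.add ns (PySem.Int.mod (s + addition) d)) PySem.Set.empty
            (cumul, st.2.insert b new_set))
          (PySem.Set.empty, PySem.Dict.empty)).2)
      ((PySem.List.pyRange ms (t + 1) 1).foldl (fun (ex : PySem.Dict Int (PySem.Set Int)) b =>
        PySem.Dict.modify (if ex.contains b then ex else ex.insert b PySem.Set.empty) b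
          PySem.Set.empty (fun s => PySem.Set.add s (PySem.Int.mod (PySem.List.pyGetD (c0 :: rest) 0 0 * PySem.List.pyGetD ((PySem.List.pyRange 0 (t + 1) 1).map (fun b => PySem.Int.powMod 2 b.toNat d)) b 0) d))) PySem.Dict.empty) (by norm_num)
  rw [hdrop]
  have hE0 : ((PySem.List.pyRange ms (t + 1) 1).foldl (fun (ex : PySem.Dict Int (PySem.Set Int)) b =>
        PySem.Dict.modify (if ex.contains b then ex else ex.insert b PySem.Set.empty) b
          PySem.Set.empty (fun s => PySem.Set.add s (PySem.Int.mod (PySem.List.pyGetD (c0 :: rest) 0 0 * PySem.List.pyGetD ((PySem.List.pyRange 0 (t + 1) 1).map (fun b => PySem.Int.powMod 2 b.toNat d)) b 0) d))) PySem.Dict.empty)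
      = PySem.Dict.mk ((PySem.List.pyRange ms (t + 1) 1).map
          (fun b => (b, (PySem.Set.ofList (pvR0 c0 d b) : PySem.Set Int)))) := by
    have h1 := foldA0 (fun b => PySem.Int.mod (PySem.List.pyGetD (c0 :: rest) 0 0 * PySem.List.pyGetD ((PySem.List.pyRange 0 (t + 1) 1).map (fun b => PySem.Int.powMod 2 b.toNat d)) b 0) d)
      (PySem.List.pyRange ms (t + 1) 1) hnd PySem.Dict.empty (fun b _ => rfl)
    refine (dict_eta _).trans (congrArg PySem.Dict.mk ?_)
    refine (by simpa using h1 : _ = (PySem.List.pyRange ms (t + 1) 1).map _).trans ?_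
    refine List.map_congr_left ?_
    intro b hb
    rw [hpw b hb]
    rfl
  rw [hE0]
  have hcongr : rest.foldl
      (fun (ex : PySem.Dict Int (PySem.Set Int)) c =>
        ((PySem.List.pyRange ms (t + 1) 1).foldl (fun (st : PySem.Set Int × PySem.Dict Int (PySem.Set Int)) b =>
          let cumul := if ex.contains b then PySem.Set.union st.1 (ex.getD b PySem.Set.empty) else st.1
          if cumul.isEmpty then (cumul, st.2)
          else
            let addition := PySem.Int.mod (c * PySem.List.pyGetD ((PySem.List.pyRange 0 (t + 1) 1).map (fun b => PySem.Int.powMod 2 b.toNat d)) b 0) d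
            let new_set := cumul.foldl (fun ns s => PySem.Set.add ns (PySem.Int.mod (s + addition) d)) PySem.Set.empty
            (cumul, st.2.insert b new_set))
          (PySem.Set.empty, PySem.Dict.empty)).2)
      (PySem.Dict.mk ((PySem.List.pyRange ms (t + 1) 1).map
          (fun b => (b, (PySem.Set.ofList (pvR0 c0 d b) : PySem.Set Int)))))
    = rest.foldl (passA d ms t)
      (PySem.Dict.mk ((PySem.List.pyRange ms (t + 1) 1).map
          (fun b => (b, (PySem.Set.ofList (pvR0 c0 d b) : PySem.Set Int))))) := by
    apply PySem.List.foldl_congr_mem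
    intro ex c _
    unfold passA
    congr 1
    apply PySem.List.foldl_congr_mem
    intro st b hb
    simp only [hpw b hb]
  rw [hcongr]
  exact mainLoopA d ms t rest (pvR0 c0 d) (fun b _ => by simp [pvR0])

-- ---- B side ----
def pvNew (c0 : Int) (rest : List Int) (d ms b : Int) (i : Nat) : PySem.Set Int :=
  PySem.Set.ofList ((PySem.List.pyRange ms (b + 1) 1).flatMap (pvIter d ms (rest.take i) (pvR0 c0 d)))

def pvOld (c0 : Int) (rest : List Int) (d ms b : Int) (i : Nat) : PySem.Set Int :=
  PySem.Set.ofList ((PySem.List.pyRange ms b 1).flatMap (pvIter d ms (rest.take i) (pvR0 c0 d)))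

def pvMix (c0 : Int) (rest : List Int) (d ms b : Int) (k : Nat) : List (PySem.Set Int) :=
  (List.range (c0 :: rest).length).map (fun i =>
    if i < k then pvNew c0 rest d ms b i else pvOld c0 rest d ms b i)

theorem getMix (c0 : Int) (rest : List Int) (d ms b : Int) (k i : Nat)
    (hi : i < (c0 :: rest).length) :
    PySem.List.pyGetD (pvMix c0 rest d ms b k) (i : Int) PySem.Set.empty
      = if i < k then pvNew c0 rest d ms b i else pvOld c0 rest d ms b i := by
  rw [PySem.List.pyGetD_natCast, List.getD_eq_getElem _ _ (by simpa [pvMix] using hi)]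
  simp [pvMix]

theorem setMix (c0 : Int) (rest : List Int) (d ms b : Int) (k : Nat)
    (hk : k < (c0 :: rest).length) :
    PySem.List.pySetD (pvMix c0 rest d ms b k) (k : Int) (pvNew c0 rest d ms b k)
      = pvMix c0 rest d ms b (k + 1) := by
  rw [PySem.List.pySetD_natCast]
  apply List.ext_getElem
  · simp [pvMix]
  · intro i h1 h2
    rw [List.getElem_set]
    simp only [pvMix, List.getElem_map, List.getElem_range]
    rcases Nat.lt_trichotomy i k with h | h | h
    · simp [Nat.ne_of_gt h, h, Nat.lt_succ_of_lt h]
    · subst h; simp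
    · rw [if_neg (by omega), if_neg (by omega), if_neg (by omega)]

theorem takeSucc (rest : List Int) (j : Nat) (hj : j < rest.length) :
    rest.take (j + 1) = rest.take j ++ [rest[j]] := by
  rw [List.take_add_one, List.getElem?_eq_getElem hj]
  rfl

theorem pvIter_succ (d ms : Int) (rest : List Int) (R : Int → List Int) (j : Nat)
    (hj : j < rest.length) :
    pvIter d ms (rest.take (j + 1)) R = pvStep d ms rest[j] (pvIter d ms (rest.take j) R) := by
  unfold pvIter
  rw [takeSucc rest j hj, List.foldl_append]
  rfl

theorem newOld (c0 : Int) (rest : List Int) (d ms b : Int) (i : Nat) (hb : ms ≤ b) :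
    pvNew c0 rest d ms b i
      = PySem.Set.update (pvOld c0 rest d ms b i) (pvIter d ms (rest.take i) (pvR0 c0 d) b) := by
  unfold pvNew pvOld
  rw [PySem.List.pyRange_one_succ_right hb, List.flatMap_append, List.flatMap_cons,
    List.flatMap_nil, List.append_nil, PySem.Set.ofList_append]

theorem innerB (c0 : Int) (rest : List Int) (d ms b : Int) (hb : ms ≤ b) :
    ∀ (k jl : Nat), jl + k = (c0 :: rest).length → ∀ (st : List (PySem.Set Int) × List Int),
    st.1 = pvMix c0 rest d ms b jl →
    (jl = 0 → st.2 = [PySem.Int.mod (PySem.List.pyGetD (c0 :: rest) 0 0 * PySem.Int.powMod 2 b.toNat d) d]) →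
    ((PySem.List.pyRange (jl : Int) (((c0 :: rest).length : Nat) : Int) 1).foldl
      (fun (st : List (PySem.Set Int) × List Int) j =>
        let vals := if j == 0 then st.2
          else (PySem.List.pyGetD st.1 (j - 1) PySem.Set.empty).map
            (fun s => PySem.Int.mod (s + PySem.Int.mod (PySem.List.pyGetD (c0 :: rest) j 0 * PySem.Int.powMod 2 b.toNat d) d) d)
        let pj := PySem.List.pyGetD st.1 j PySem.Set.empty
        (PySem.List.pySetD st.1 j (PySem.Set.update pj vals), vals))
      st).1
    = pvMix c0 rest d ms b (c0 :: rest).length := by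
  intro k
  induction k with
  | zero =>
    intro jl hjl st hst1 _
    have hjn : jl = (c0 :: rest).length := by omega
    subst hjn
    rw [PySem.List.pyRange_one_eq_nil (le_refl _), List.foldl_nil]
    exact hst1
  | succ k ih =>
    intro jl hjl st hst1 hst2
    have hjln : jl < (c0 :: rest).length := by omega
    have hlt : (jl : Int) < (((c0 :: rest).length : Nat) : Int) := by exact_mod_cast hjln
    rw [PySem.List.pyRange_one_cons hlt, List.foldl_cons]
    have h1 : ((fun (st : List (PySem.Set Int) × List Int) j =>
        let vals := if j == 0 then st.2
          else (PySem.List.pyGetD st.1 (j - 1) PySem.Set.empty).map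
            (fun s => PySem.Int.mod (s + PySem.Int.mod (PySem.List.pyGetD (c0 :: rest) j 0 * PySem.Int.powMod 2 b.toNat d) d) d)
        let pj := PySem.List.pyGetD st.1 j PySem.Set.empty
        (PySem.List.pySetD st.1 j (PySem.Set.update pj vals), vals))
        st (jl : Int)).1 = pvMix c0 rest d ms b (jl + 1) := by
      show PySem.List.pySetD st.1 (jl : Int)
          (PySem.Set.update (PySem.List.pyGetD st.1 (jl : Int) PySem.Set.empty)
            (if ((jl : Int) == 0) then st.2
             else (PySem.List.pyGetD st.1 ((jl : Int) - 1) PySem.Set.empty).map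
               (fun s => PySem.Int.mod (s + PySem.Int.mod (PySem.List.pyGetD (c0 :: rest) (jl : Int) 0 * PySem.Int.powMod 2 b.toNat d) d) d)))
          = pvMix c0 rest d ms b (jl + 1)
      rw [hst1, getMix c0 rest d ms b jl jl hjln, if_neg (by omega)]
      cases jl with
      | zero =>
        rw [if_pos (by norm_num), hst2 rfl]
        have hv' : [PySem.Int.mod (PySem.List.pyGetD (c0 :: rest) 0 0 * PySem.Int.powMod 2 b.toNat d) d]
            = pvIter d ms (rest.take 0) (pvR0 c0 d) b := by
          rw [PySem.List.pyGetD_zero_cons]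
          rfl
        rw [hv', ← newOld c0 rest d ms b 0 hb]
        exact setMix c0 rest d ms b 0 hjln
      | succ j' =>
        rw [if_neg (by simp; omega)]
        have hidx : (((j' + 1 : Nat) : Int)) - 1 = ((j' : Nat) : Int) := by push_cast; ring
        rw [hidx, getMix c0 rest d ms b (j' + 1) j' (by omega), if_pos (by omega)]
        have hj' : j' < rest.length := by
          simpa using hjln
        have hc : PySem.List.pyGetD (c0 :: rest) (((j' + 1 : Nat) : Int)) 0 = rest[j'] := by
          rw [PySem.List.pyGetD_natCast, List.getD_cons_succ, List.getD_eq_getElem _ _ hj']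
        rw [hc]
        unfold pvNew
        rw [sUpdate_map_ofList]
        have hstep : ((PySem.List.pyRange ms (b + 1) 1).flatMap (pvIter d ms (rest.take j') (pvR0 c0 d))).map
            (fun s => PySem.Int.mod (s + PySem.Int.mod (rest[j'] * PySem.Int.powMod 2 b.toNat d) d) d)
            = pvIter d ms (rest.take (j' + 1)) (pvR0 c0 d) b := by
          rw [pvIter_succ d ms rest (pvR0 c0 d) j' hj']
          rfl
        rw [hstep, ← newOld c0 rest d ms b (j' + 1) hb]
        exact setMix c0 rest d ms b (j' + 1) hjln
    have hcast : ((jl : Int) + 1) = (((jl + 1 : Nat)) : Int) := by push_cast; ring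
    rw [hcast]
    exact ih (jl + 1) (by omega) _ h1 (by omega)

theorem outerB (c0 : Int) (rest : List Int) (d ms t : Int) :
    ∀ (k : Nat) (lo : Int), ms ≤ lo → (t + 1 - lo).toNat = k →
    (PySem.List.pyRange lo (t + 1) 1).foldl (fun pref b =>
      ((PySem.List.pyRange 0 (((c0 :: rest).length : Nat) : Int) 1).foldl
        (fun (st : List (PySem.Set Int) × List Int) j =>
          let vals := if j == 0 then st.2
            else (PySem.List.pyGetD st.1 (j - 1) PySem.Set.empty).map
              (fun s => PySem.Int.mod (s + PySem.Int.mod (PySem.List.pyGetD (c0 :: rest) j 0 * PySem.Int.powMod 2 b.toNat d) d) d)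
          let pj := PySem.List.pyGetD st.1 j PySem.Set.empty
          (PySem.List.pySetD st.1 j (PySem.Set.update pj vals), vals))
        (pref, [PySem.Int.mod (PySem.List.pyGetD (c0 :: rest) 0 0 * PySem.Int.powMod 2 b.toNat d) d])).1)
      ((List.range (c0 :: rest).length).map (fun i =>
        PySem.Set.ofList ((PySem.List.pyRange ms lo 1).flatMap (pvIter d ms (rest.take i) (pvR0 c0 d)))))
    = (List.range (c0 :: rest).length).map (fun i =>
        PySem.Set.ofList (((PySem.List.pyRange ms lo 1) ++ (PySem.List.pyRange lo (t + 1) 1)).flatMap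
          (pvIter d ms (rest.take i) (pvR0 c0 d)))) := by
  intro k
  induction k with
  | zero =>
    intro lo hlo hk
    rw [show PySem.List.pyRange lo (t + 1) 1 = [] from PySem.List.pyRange_one_eq_nil (by omega),
      List.foldl_nil]
    simp
  | succ k ih =>
    intro lo hlo hk
    by_cases hlt : lo < t + 1
    · rw [PySem.List.pyRange_one_cons hlt, List.foldl_cons]
      have hmix0 : ((List.range (c0 :: rest).length).map (fun i =>
          PySem.Set.ofList ((PySem.List.pyRange ms lo 1).flatMap (pvIter d ms (rest.take i) (pvR0 c0 d)))))
          = pvMix c0 rest d ms lo 0 := by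
        simp [pvMix, pvOld]
      have hfinal : pvMix c0 rest d ms lo (c0 :: rest).length
          = (List.range (c0 :: rest).length).map (fun i =>
            PySem.Set.ofList ((PySem.List.pyRange ms (lo + 1) 1).flatMap (pvIter d ms (rest.take i) (pvR0 c0 d)))) := by
        unfold pvMix
        refine List.map_congr_left ?_
        intro i hi
        rw [if_pos (List.mem_range.mp hi)]
        rfl
      have hinner := innerB c0 rest d ms lo hlo (c0 :: rest).length 0 (by omega)
        (((List.range (c0 :: rest).length).map (fun i =>
            PySem.Set.ofList ((PySem.List.pyRange ms lo 1).flatMap (pvIter d ms (rest.take i) (pvR0 c0 d))))),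
         [PySem.Int.mod (PySem.List.pyGetD (c0 :: rest) 0 0 * PySem.Int.powMod 2 lo.toNat d) d])
        hmix0 (fun _ => rfl)
      simp only [Nat.cast_zero] at hinner
      rw [hinner, hfinal, ih (lo + 1) (by omega) (by omega)]
      rw [PySem.List.pyRange_one_succ_right hlo, List.append_assoc, List.singleton_append]
    · omega

theorem bSide (c0 : Int) (rest : List Int) (d t ms : Int) :
    dp_forward_sums_alt (c0 :: rest) d t ms
      = PySem.Set.ofList ((PySem.List.pyRange ms (t + 1) 1).flatMap (pvIter d ms rest (pvR0 c0 d))) := by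
  show PySem.Set.ofList (PySem.List.pyGetD
      ((PySem.List.pyRange ms (t + 1) 1).foldl (fun pref b =>
        ((PySem.List.pyRange 0 (((c0 :: rest).length : Nat) : Int) 1).foldl
          (fun (st : List (PySem.Set Int) × List Int) j =>
            let vals := if j == 0 then st.2
              else (PySem.List.pyGetD st.1 (j - 1) PySem.Set.empty).map
                (fun s => PySem.Int.mod (s + PySem.Int.mod (PySem.List.pyGetD (c0 :: rest) j 0 * PySem.Int.powMod 2 b.toNat d) d) d)
            let pj := PySem.List.pyGetD st.1 j PySem.Set.empty
            (PySem.List.pySetD st.1 j (PySem.Set.update pj vals), vals))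
          (pref, [PySem.Int.mod (PySem.List.pyGetD (c0 :: rest) 0 0 * PySem.Int.powMod 2 b.toNat d) d])).1)
        (List.replicate (c0 :: rest).length PySem.Set.empty)) (-1) PySem.Set.empty)
    = PySem.Set.ofList ((PySem.List.pyRange ms (t + 1) 1).flatMap (pvIter d ms rest (pvR0 c0 d)))
  have hnilrange : PySem.List.pyRange ms ms 1 = [] := PySem.List.pyRange_one_eq_nil (le_refl _)
  have hrepl : List.replicate (c0 :: rest).length (PySem.Set.empty : PySem.Set Int)
      = (List.range (c0 :: rest).length).map (fun i =>
          PySem.Set.ofList ((PySem.List.pyRange ms ms 1).flatMap (pvIter d ms (rest.take i) (pvR0 c0 d)))) := by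
    have h : ∀ i ∈ List.range (c0 :: rest).length,
        PySem.Set.ofList ((PySem.List.pyRange ms ms 1).flatMap (pvIter d ms (rest.take i) (pvR0 c0 d)))
          = (PySem.Set.empty : PySem.Set Int) := by
      intro i _
      rw [hnilrange]
      rfl
    rw [List.map_congr_left h, List.map_const', List.length_range]
  rw [hrepl, outerB c0 rest d ms t (t + 1 - ms).toNat ms (le_refl _) rfl, hnilrange, List.nil_append]
  have hnonnil : (List.range (c0 :: rest).length).map (fun i =>
      PySem.Set.ofList ((PySem.List.pyRange ms (t + 1) 1).flatMap (pvIter d ms (rest.take i) (pvR0 c0 d)))) ≠ [] := by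
    simp
  rw [PySem.List.pyGetD_neg_one _ _ hnonnil, List.getLast_eq_getElem]
  simp only [List.length_map, List.length_range, List.getElem_map, List.getElem_range,
    List.length_cons]
  rw [show rest.length + 1 - 1 = rest.length from rfl, List.take_length, PySem.Set.ofList_ofList]

-- ===== VERDICT (by name: the statement is the Claim_ definition above) =====
theorem dp_forward_sums_spec : Claim_equal_dp_forward_sums := by
  intro coeff_list d top ms _ hpre
  unfold Spec_dp_forward_sums
  cases coeff_list with
  | nil => rfl
  | cons c0 rest =>
    rw [aSide c0 rest d top ms hpre.2, bSide c0 rest d top ms]
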